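-- pv_equiv track=rewrite | github.com/avwx-rest/avwx-engine | avwx/current/taf.py | fix_report_header
-- ===== SOURCE A (Python) =====
-- from contextlib import suppress
--
-- def fix_report_header(report: str) -> str:
--     """Correct the header order for key elements."""
--     split_report = report.split()
--
--     # Limit scope to only the first few elements. Remarks may include similar tokens
--     header_length = min(len(split_report), 6)
--     headers = split_report[:header_length]
--
--     fixed_headers = []
--     for target in ("TAF", "AMD", "COR"):
--         with suppress(ValueError):
--             headers.remove(target)
--             fixed_headers.append(target)
--
--     return " ".join(fixed_headers + headers + split_report[header_length:])
-- ===== SOURCE B (Python) =====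
-- def fix_report_header(report: str) -> str:
--     """Correct the header order for key elements."""
--     tokens = report.split()
--     header_length = min(len(tokens), 6)
--
--     # Single pass over the header tokens: capture each pending target once,
--     # keep everything else in place.
--     pending = ["TAF", "AMD", "COR"]
--     rest = []
--     for token in tokens[:header_length]:
--         if token in pending:
--             pending.remove(token)
--         else:
--             rest.append(token)
--
--     found = [t for t in ("TAF", "AMD", "COR") if t not in pending]
--     return " ".join(found + rest + tokens[header_length:])
-- ===== Notes on version B (the rewrite author's own statement) =====
-- stated objective: alternative
-- what changed: Replaced the target-major loop (three passes of headers.remove over the header slice) with a single token-major pass that keeps a pending-target list and a rest list, then emits the captured targets in fixed TAF/AMD/COR order.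
import Mathlib
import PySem

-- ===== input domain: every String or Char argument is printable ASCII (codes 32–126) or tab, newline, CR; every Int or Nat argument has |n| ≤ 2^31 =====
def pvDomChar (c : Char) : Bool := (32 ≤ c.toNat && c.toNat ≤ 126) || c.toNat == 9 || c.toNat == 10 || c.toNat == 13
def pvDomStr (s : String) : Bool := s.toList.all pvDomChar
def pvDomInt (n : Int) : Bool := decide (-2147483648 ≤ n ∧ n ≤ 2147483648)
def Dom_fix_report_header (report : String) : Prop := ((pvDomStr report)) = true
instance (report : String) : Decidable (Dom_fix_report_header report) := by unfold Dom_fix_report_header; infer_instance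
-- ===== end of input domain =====

-- B re-implements the target-major remove loop as a single token-major pass with a pending-target list; same return value, no speed claim.

-- ===== PORT A =====
-- one iteration of A's 'for target in ("TAF","AMD","COR")' loop: headers.remove(target) with suppress(ValueError)
def fixStepA (acc : List String × List String) (target : String) : List String × List String :=
  match PySem.List.remove? acc.2 target with
  | none => acc
  | some hs => (acc.1 ++ [target], hs)

def fix_report_header (report : String) : String :=
  let split_report := PySem.Str.split₀ report
  let header_length : Int := min (split_report.length : Int) 6
  let headers := PySem.List.slice split_report none (some header_length)
  let res := ["TAF", "AMD", "COR"].foldl fixStepA ([], headers)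
  PySem.Str.join " " (res.1 ++ res.2 ++ PySem.List.slice split_report (some header_length) none)

-- ===== PORT B =====
-- one iteration of B's single pass; pending.remove(token) is guarded by 'token in pending', so remove? is some and getD is exact
def fixStepB (acc : List String × List String) (token : String) : List String × List String :=
  if token ∈ acc.1 then ((PySem.List.remove? acc.1 token).getD acc.1, acc.2)
  else (acc.1, acc.2 ++ [token])

def fix_report_header_alt (report : String) : String :=
  let tokens := PySem.Str.split₀ report
  let header_length : Int := min (tokens.length : Int) 6
  let res := (PySem.List.slice tokens none (some header_length)).foldl fixStepB (["TAF", "AMD", "COR"], [])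
  let found := ["TAF", "AMD", "COR"].filter (fun t => t ∉ res.1)
  PySem.Str.join " " (found ++ res.2 ++ PySem.List.slice tokens (some header_length) none)

-- ===== PRECONDITION & SPEC =====
def Spec_fix_report_header (report : String) (out : String) : Prop := out = fix_report_header_alt report
instance (report : String) (out : String) : Decidable (Spec_fix_report_header report out) := by unfold Spec_fix_report_header; infer_instance

-- ===== CLAIM (what is proved, stated in full; the proofs are below) =====
def Claim_equal_fix_report_header : Prop := ∀ (report : String), Dom_fix_report_header report → Spec_fix_report_header report (fix_report_header report)

-- ===== LEMMAS AND PROOFS =====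

-- the tokens of hs left after removing the first occurrence of each pending target, token-major
def restOf : List String → List String → List String
  | _, [] => []
  | ts, h :: hs => if h ∈ ts then restOf (ts.erase h) hs else h :: restOf ts hs

-- the pending targets left after that pass
def pendF : List String → List String → List String
  | ts, [] => ts
  | ts, h :: hs => if h ∈ ts then pendF (ts.erase h) hs else pendF ts hs

theorem foldB_eq (hs : List String) : ∀ (pending rest : List String),
    hs.foldl fixStepB (pending, rest) = (pendF pending hs, rest ++ restOf pending hs) := by
  induction hs with
  | nil => intro pending rest; simp [pendF, restOf]
  | cons h hs ih =>
      intro pending rest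
      by_cases hm : h ∈ pending
      · have : fixStepB (pending, rest) h = (pending.erase h, rest) := by
          simp [fixStepB, hm, PySem.List.remove?_eq_some_erase _ _ hm]
        simp [List.foldl, this, ih, pendF, restOf, hm]
      · have : fixStepB (pending, rest) h = (pending, rest ++ [h]) := by
          simp [fixStepB, hm]
        simp [List.foldl, this, ih, pendF, restOf, hm]

theorem foldA_eq (ts : List String) : ∀ (fixed hs : List String), ts.Nodup →
    ts.foldl fixStepA (fixed, hs) =
      (fixed ++ ts.filter (fun t => decide (t ∈ hs)), ts.foldl (fun l t => l.erase t) hs) := by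
  induction ts with
  | nil => intro fixed hs _; simp
  | cons t ts ih =>
      intro fixed hs hnd
      have hnd' : ts.Nodup := hnd.of_cons
      have hne : ∀ x ∈ ts, x ≠ t := fun x hx => by
        rintro rfl; exact (List.nodup_cons.mp hnd).1 hx
      by_cases hm : t ∈ hs
      · have hstep : fixStepA (fixed, hs) t = (fixed ++ [t], hs.erase t) := by
          simp [fixStepA, PySem.List.remove?_eq_some_erase _ _ hm]
        have hfilter : ts.filter (fun x => decide (x ∈ hs.erase t)) =
            ts.filter (fun x => decide (x ∈ hs)) := by
          apply List.filter_congr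
          intro x hx
          simp [List.mem_erase_of_ne (hne x hx)]
        simp [List.foldl, hstep, ih _ _ hnd', hfilter, hm]
      · have hstep : fixStepA (fixed, hs) t = (fixed, hs) := by
          simp [fixStepA, (PySem.List.remove?_eq_none_iff _ _).mpr hm]
        simp [List.foldl, hstep, ih _ _ hnd', hm, List.erase_of_not_mem hm]

theorem foldl_erase_nil (ts : List String) : ts.foldl (fun l t => l.erase t) [] = [] := by
  induction ts with
  | nil => rfl
  | cons t ts ih => simpa using ih

theorem foldl_erase_cons_not_mem (h : String) (x : List String) :
    ∀ ts : List String, h ∉ ts →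
      ts.foldl (fun l t => l.erase t) (h :: x) = h :: ts.foldl (fun l t => l.erase t) x := by
  intro ts
  induction ts generalizing x with
  | nil => intro _; rfl
  | cons t ts ih =>
      intro hnm
      have ht : t ≠ h := fun e => hnm (by simp [e])
      have : (h :: x).erase t = h :: x.erase t := List.erase_cons_tail (by simp [ht.symm])
      simp only [List.foldl, this]
      exact ih (x.erase t) (fun hm => hnm (by simp [hm]))

theorem foldl_perm_erase {ts ts' : List String} (hp : List.Perm ts ts') (x : List String) :
    ts.foldl (fun l t => l.erase t) x = ts'.foldl (fun l t => l.erase t) x := by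
  induction hp generalizing x with
  | nil => rfl
  | cons a _ ih => simp only [List.foldl]; exact ih _
  | swap a b l => simp only [List.foldl, List.erase_comm]
  | trans _ _ ih1 ih2 => exact (ih1 x).trans (ih2 x)

theorem eraseAll_eq_restOf (hs : List String) : ∀ ts : List String, ts.Nodup →
    ts.foldl (fun l t => l.erase t) hs = restOf ts hs := by
  induction hs with
  | nil => intro ts _; simp [restOf, foldl_erase_nil]
  | cons h hs ih =>
      intro ts hnd
      by_cases hm : h ∈ ts
      · have hperm : List.Perm ts (h :: ts.erase h) := List.perm_cons_erase hm
        rw [foldl_perm_erase hperm (h :: hs)]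
        simp only [List.foldl, List.erase_cons_head]
        rw [ih _ (hnd.erase h)]
        simp [restOf, hm]
      · rw [foldl_erase_cons_not_mem h hs ts hm, ih ts hnd]
        simp [restOf, hm]

theorem mem_pendF (hs : List String) : ∀ ts x, x ∈ pendF ts hs → x ∈ ts := by
  induction hs with
  | nil => intro ts x hx; simpa [pendF] using hx
  | cons h hs ih =>
      intro ts x hx
      by_cases hm : h ∈ ts
      · simp only [pendF, hm, if_true] at hx
        exact List.mem_of_mem_erase (ih _ _ hx)
      · simp only [pendF, hm, if_false] at hx
        exact ih _ _ hx

theorem pendF_iff (hs : List String) : ∀ ts t, ts.Nodup → t ∈ ts →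
    (t ∈ pendF ts hs ↔ t ∉ hs) := by
  induction hs with
  | nil => intro ts t _ ht; simp [pendF, ht]
  | cons h hs ih =>
      intro ts t hnd ht
      by_cases hm : h ∈ ts
      · simp only [pendF, hm, if_true]
        by_cases hth : t = h
        · subst hth
          have hni : t ∉ ts.erase t := (List.Nodup.not_mem_erase hnd)
          constructor
          · intro hc; exact absurd (mem_pendF hs _ _ hc) hni
          · intro hc; exact absurd (by simp : t ∈ t :: hs) hc
        · have ht' : t ∈ ts.erase h := List.mem_erase_of_ne hth |>.mpr ht
          rw [ih _ _ (hnd.erase h) ht']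
          simp [hth]
      · simp only [pendF, hm, if_false]
        have hth : t ≠ h := fun e => hm (e ▸ ht)
        rw [ih _ _ hnd ht]
        simp [hth]

-- ===== VERDICT (by name: the statement is the Claim_ definition above) =====
theorem fix_report_header_spec : Claim_equal_fix_report_header := by
  intro report _
  unfold Spec_fix_report_header fix_report_header fix_report_header_alt
  simp only []
  set sr := PySem.Str.split₀ report with hsr
  set n : Int := min (sr.length : Int) 6 with hn
  set hs := PySem.List.slice sr none (some n) with hhs
  have hnd : (["TAF", "AMD", "COR"] : List String).Nodup := by decide
  have hA := foldA_eq ["TAF", "AMD", "COR"] [] hs hnd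
  have hB := foldB_eq hs ["TAF", "AMD", "COR"] []
  rw [hA, hB]
  simp only [List.nil_append]
  rw [eraseAll_eq_restOf hs _ hnd]
  have hfound : (["TAF", "AMD", "COR"] : List String).filter
        (fun t => decide (t ∉ pendF ["TAF", "AMD", "COR"] hs)) =
      (["TAF", "AMD", "COR"] : List String).filter (fun t => decide (t ∈ hs)) := by
    apply List.filter_congr
    intro t ht
    simp [pendF_iff hs _ t hnd ht]
  rw [hfound]
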